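-- pv_equiv track=rewrite | github.com/Carlosfdez239/PRODUCTION | DevTools/Misc/CloseVersionHelpers/GnssNodeUbloxScripts/ubloxutils.py | ubx_check_crc
-- ===== SOURCE A (Python) =====
-- def ubx_check_crc(data):
--     ck_a = 0
--     ck_b = 0
--
--     # Start from the ACK ID (skipping header bytes and ending before CRC bytes)
--     for byte in data[2:-2]:  # Skip the first 2 bytes (header) and last 2 bytes (CRC)
--         ck_a = (ck_a + byte) & 0xFF
--         ck_b = (ck_b + ck_a) & 0xFF
--
--     # The last two bytes in the data should be CK_A and CK_B
--     expected_ck_a = data[-2]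
--     expected_ck_b = data[-1]
--
--     # Compare the calculated CRC with the expected values (CK_A and CK_B)
--     return expected_ck_a == ck_a and expected_ck_b == ck_b
-- ===== SOURCE B (Python) =====
-- def ubx_check_crc(data):
--     chunk = data[2:-2]
--     n = len(chunk)
--     ck_a = sum(chunk) & 0xFF
--     ck_b = sum((n - i) * b for i, b in enumerate(chunk)) & 0xFF
--     return data[-2] == ck_a and data[-1] == ck_b
-- ===== Notes on version B (the rewrite author's own statement) =====
-- stated objective: alternative
-- what changed: Replaces the sequential Fletcher recurrence carrying (ck_a, ck_b) through every byte by two independent closed-form sums over the payload: ck_a = sum(chunk) & 0xFF and ck_b = sum((len-i)*b) & 0xFF, valid because byte i contributes to exactly len-i partial sums and & 0xFF commutes with addition mod 256.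
import Mathlib
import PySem

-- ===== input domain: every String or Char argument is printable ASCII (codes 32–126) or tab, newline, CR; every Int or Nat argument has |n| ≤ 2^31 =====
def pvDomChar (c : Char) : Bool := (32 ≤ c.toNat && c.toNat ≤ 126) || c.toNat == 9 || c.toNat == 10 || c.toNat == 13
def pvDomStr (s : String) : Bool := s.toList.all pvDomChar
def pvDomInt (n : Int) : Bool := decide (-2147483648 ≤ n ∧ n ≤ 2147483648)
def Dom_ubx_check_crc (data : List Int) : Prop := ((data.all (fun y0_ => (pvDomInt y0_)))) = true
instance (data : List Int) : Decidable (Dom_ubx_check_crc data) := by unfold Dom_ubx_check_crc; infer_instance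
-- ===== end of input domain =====

-- B replaces A's sequential two-register Fletcher recurrence by two independent
-- closed-form sums over the payload (ck_b via positional weights len-i); same values, alternative decomposition.

-- ===== PORT A =====
-- literal transliteration of A: a fold carrying (ck_a, ck_b) over data[2:-2],
-- then comparison with the last two elements (none = IndexError, excluded by Pre_)
def ubx_check_crc (data : List Int) : Bool :=
  let cks := (PySem.List.slice data (some 2) (some (-2))).foldl
    (fun (ck : Int × Int) byte =>
      let ck_a := PySem.Int.band (ck.1 + byte) 0xFF
      let ck_b := PySem.Int.band (ck.2 + ck_a) 0xFF
      (ck_a, ck_b)) (0, 0)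
  match PySem.List.pyGet? data (-2), PySem.List.pyGet? data (-1) with
  | some expected_ck_a, some expected_ck_b =>
      expected_ck_a == cks.1 && expected_ck_b == cks.2
  | _, _ => false

-- ===== PORT B =====
-- literal transliteration of Source B: chunk, n, two independent sums, final comparison
def ubx_check_crc_alt (data : List Int) : Bool :=
  let chunk := PySem.List.slice data (some 2) (some (-2))
  let n := chunk.length
  let ck_a := PySem.Int.band (chunk.foldl (fun s b => s + b) 0) 0xFF
  let ck_b := PySem.Int.band
    ((PySem.List.enumerate chunk).foldl (fun s p => s + ((n : Int) - p.1) * p.2) 0) 0xFF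
  match PySem.List.pyGet? data (-2) with
  | none => false
  | some ea =>
    match PySem.List.pyGet? data (-1) with
    | none => false
    | some eb => ea == ck_a && eb == ck_b

-- ===== PRECONDITION & SPEC =====
-- Python A raises IndexError reading the trailing CRC bytes when the list has fewer than 2 elements; exactly that is excluded (B raises there too).
def Pre_ubx_check_crc (data : List Int) : Prop := 2 ≤ data.length
instance (data : List Int) : Decidable (Pre_ubx_check_crc data) := by
  unfold Pre_ubx_check_crc; infer_instance
def pvWitness_ubx_check_crc : List Int := [0, 0]

def Spec_ubx_check_crc (data : List Int) (out : Bool) : Prop := out = ubx_check_crc_alt data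
instance (data : List Int) (out : Bool) : Decidable (Spec_ubx_check_crc data out) := by
  unfold Spec_ubx_check_crc; infer_instance

-- ===== CLAIM (what is proved, stated in full; the proofs are below) =====
def Claim_equal_ubx_check_crc : Prop := ∀ (data : List Int), Dom_ubx_check_crc data → Pre_ubx_check_crc data → Spec_ubx_check_crc data (ubx_check_crc data)

-- ===== LEMMAS AND PROOFS =====

-- `x & 0xFF` in Python is `x mod 256` (floor mod, positive divisor, = Int.emod)
theorem band255_eq_emod (a : Int) : PySem.Int.band a 255 = a % 256 := by
  unfold PySem.Int.band
  by_cases h : 0 ≤ a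
  · simp only [h, if_true, if_pos (by norm_num : (0:Int) ≤ 255)]
    have h1 : (255 : Int).toNat = 255 := rfl
    rw [h1]
    have h2 : a.toNat &&& 255 = a.toNat % 256 := Nat.and_two_pow_sub_one_eq_mod a.toNat 8
    rw [h2]
    omega
  · simp only [h, if_false, if_pos (by norm_num : (0:Int) ≤ 255)]
    have h1 : (255 : Int).toNat = 255 := rfl
    rw [h1]
    have h2 : 255 &&& (-a - 1).toNat = (-a - 1).toNat % 256 := by
      rw [Nat.and_comm]
      exact Nat.and_two_pow_sub_one_eq_mod (-a - 1).toNat 8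
    rw [h2]
    have h3 : ((-a - 1).toNat : Int) = -a - 1 := by omega
    have h4 : (-a - 1).toNat % 256 < 256 := Nat.mod_lt _ (by norm_num)
    have h5 : (((-a - 1).toNat % 256 : Nat) : Int) = (-a - 1) % 256 := by
      push_cast [h3]; ring
    omega

-- the weighted sum Σ (len-i)·xᵢ, structurally
def wS : List Int → Int
  | [] => 0
  | x :: t => ((t.length + 1 : Nat) : Int) * x + wS t

-- A's fold, characterised: both registers are closed-form sums mod 256
theorem foldA_closed (l : List Int) : ∀ (a b : Int),
    l.foldl (fun (ck : Int × Int) byte =>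
      let ck_a := PySem.Int.band (ck.1 + byte) 0xFF
      let ck_b := PySem.Int.band (ck.2 + ck_a) 0xFF
      (ck_a, ck_b)) (a % 256, b % 256)
    = ((a + l.sum) % 256, (b + (l.length : Int) * a + wS l) % 256) := by
  induction l with
  | nil => intro a b; simp [wS]
  | cons x t ih =>
    intro a b
    simp only [List.foldl_cons]
    have e1 : PySem.Int.band (a % 256 + x) 0xFF = (a + x) % 256 := by
      rw [band255_eq_emod]; omega
    have e2 : PySem.Int.band (b % 256 + (a + x) % 256) 0xFF = (b + a + x) % 256 := by
      rw [band255_eq_emod]; omega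
    simp only [e1, e2]
    rw [ih (a + x) (b + a + x)]
    simp only [List.sum_cons, List.length_cons, wS, Prod.mk.injEq]
    refine ⟨by ring_nf, by push_cast; ring_nf⟩

-- B's weighted fold equals wS (generalising the enumerate start; w is the fixed total length)
theorem foldB_weighted (l : List Int) : ∀ (s c w : Int), w = s + (l.length : Int) →
    (PySem.List.enumerate l s).foldl (fun acc p => acc + (w - p.1) * p.2) c
    = c + wS l := by
  induction l with
  | nil => intro s c w _; simp [PySem.List.enumerate_nil, wS]
  | cons x t ih =>
    intro s c w hw
    rw [PySem.List.enumerate_cons]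
    simp only [List.foldl_cons]
    rw [ih (s + 1) (c + (w - s) * x) w (by simp at hw; omega)]
    simp only [wS]
    have : w - s = ((t.length + 1 : Nat) : Int) := by simp at hw; push_cast; omega
    rw [this]; ring

-- ===== VERDICT (by name: the statement is the Claim_ definition above) =====
theorem ubx_check_crc_spec : Claim_equal_ubx_check_crc := by
  intro data _hdom _hpre
  unfold Spec_ubx_check_crc ubx_check_crc ubx_check_crc_alt
  have hA : ((PySem.List.slice data (some 2) (some (-2))).foldl
      (fun (ck : Int × Int) byte =>
        let ck_a := PySem.Int.band (ck.1 + byte) 0xFF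
        let ck_b := PySem.Int.band (ck.2 + ck_a) 0xFF
        (ck_a, ck_b)) (0, 0))
      = ((PySem.List.slice data (some 2) (some (-2))).sum % 256,
         wS (PySem.List.slice data (some 2) (some (-2))) % 256) := by
    have h0 : ((0 : Int), (0 : Int)) = ((0 : Int) % 256, (0 : Int) % 256) := by norm_num
    rw [h0, foldA_closed]
    norm_num
  have hsum : (PySem.List.slice data (some 2) (some (-2))).foldl (fun s b => s + b) 0
      = (PySem.List.slice data (some 2) (some (-2))).sum := by
    rw [PySem.List.foldl_add _ (fun b => b) 0]
    simp
  have hcka : PySem.Int.band ((PySem.List.slice data (some 2) (some (-2))).foldl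
      (fun s b => s + b) 0) 0xFF
      = (PySem.List.slice data (some 2) (some (-2))).sum % 256 := by
    rw [hsum, band255_eq_emod]
  have hckb : PySem.Int.band ((PySem.List.enumerate
        (PySem.List.slice data (some 2) (some (-2)))).foldl
      (fun s p => s + (((PySem.List.slice data (some 2) (some (-2))).length : Int) - p.1) * p.2) 0) 0xFF
      = wS (PySem.List.slice data (some 2) (some (-2))) % 256 := by
    rw [foldB_weighted _ 0 0 _ (by ring), band255_eq_emod]
    norm_num
  simp only [hA, hcka, hckb]
  cases PySem.List.pyGet? data (-2) <;> cases PySem.List.pyGet? data (-1) <;> rfl
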